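-- pv_equiv track=rewrite | github.com/eliasdabbas/advertools | advertools/spider.py | _numbered_duplicates
-- ===== SOURCE A (Python) =====
-- def _numbered_duplicates(items):
--     """Append a number to all duplicated items starting at 1.
--
--     ['og:site', 'og:image', 'og:image', 'og:type', 'og:image']
--     becomes:
--     ['og:site', 'og:image_1', 'og:image_2', 'og:type', 'og:image_3']
--     """
--     item_count = dict.fromkeys(items, 0)
--     numbered_items = []
--     for item in items:
--         numbered_items.append(item + "_" + str(item_count[item]))
--         item_count[item] += 1
--     for i, num_item in enumerate(numbered_items):
--         split_number = num_item.rsplit("_", maxsplit=1)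
--         if split_number[1] == "0":
--             numbered_items[i] = split_number[0]
--     return numbered_items
-- ===== SOURCE B (Python) =====
-- def _numbered_duplicates(items):
--     seen = {}
--     out = []
--     for item in items:
--         n = seen.get(item, 0)
--         out.append(item if n == 0 else item + "_" + str(n))
--         seen[item] = n + 1
--     return out
-- ===== Notes on version B (the rewrite author's own statement) =====
-- stated objective: faster
-- what changed: B numbers occurrences in a single pass with a running count dict (first occurrence kept plain directly), eliminating A's whole second enumerate pass that rsplits every produced string on '_' to strip the '_0' suffix.
import Mathlib
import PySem

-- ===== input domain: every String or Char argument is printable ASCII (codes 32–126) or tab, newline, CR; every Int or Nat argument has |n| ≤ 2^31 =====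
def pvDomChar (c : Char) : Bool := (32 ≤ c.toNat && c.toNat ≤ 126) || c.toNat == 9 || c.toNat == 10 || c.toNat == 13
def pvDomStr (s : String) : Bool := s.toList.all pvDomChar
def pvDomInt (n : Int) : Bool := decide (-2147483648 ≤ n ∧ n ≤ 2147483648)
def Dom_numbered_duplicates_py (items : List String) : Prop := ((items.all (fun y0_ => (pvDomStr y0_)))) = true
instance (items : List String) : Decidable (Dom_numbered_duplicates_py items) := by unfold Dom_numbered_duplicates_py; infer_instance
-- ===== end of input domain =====

-- B numbers occurrences in one pass with a running count (first occurrence kept plain directly),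
-- removing A's second enumerate pass that rsplits each produced string to strip the '_0' suffix.


-- ===== PORT A =====
-- hand port of s.rsplit("_", maxsplit=1) (exact: splits at the LAST '_', at most once)
def rsplitUnd1Chars : List Char → List (List Char)
  | [] => [[]]
  | c :: rest =>
    match rsplitUnd1Chars rest with
    | [tail] => if c = '_' then [[], tail] else [c :: tail]
    | pre :: tl => (c :: pre) :: tl
    | [] => []

def rsplitUnd1 (s : String) : List String := (rsplitUnd1Chars s.toList).map String.ofList

-- one step of A's first loop: append item + "_" + str(item_count[item]); item_count[item] += 1
-- (item_count[item] is ported as getD _ 0: the key is always present, dict.fromkeys put it there)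
def pyStepA (st : List String × PySem.Dict String Int) (item : String) :
    List String × PySem.Dict String Int :=
  (st.1 ++ [item ++ "_" ++ PySem.Int.toStr (st.2.getD item 0)],
   st.2.insert item (st.2.getD item 0 + 1))

def numbered_duplicates_py (items : List String) : List String :=
  -- item_count = dict.fromkeys(items, 0)
  let item_count : PySem.Dict String Int := items.foldl (fun d x => d.insert x 0) PySem.Dict.empty
  let numbered_items := (items.foldl pyStepA ([], item_count)).1
  -- for i, num_item in enumerate(numbered_items): the in-place writes build this map
  -- (split_number[1] / [0] ported with getD: the list always has two parts, every string contains '_')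
  (PySem.List.enumerate numbered_items 0).map (fun p =>
    let split_number := rsplitUnd1 p.2
    if split_number.getD 1 "" = "0" then split_number.getD 0 "" else p.2)

-- ===== PORT B =====
-- one step of B's single loop: n = seen.get(item, 0); append plain item when n == 0; seen[item] = n + 1
def pyStepB (st : List String × PySem.Dict String Int) (item : String) :
    List String × PySem.Dict String Int :=
  let n := st.2.getD item 0
  (st.1 ++ [if n = 0 then item else item ++ "_" ++ PySem.Int.toStr n],
   st.2.insert item (n + 1))

def numbered_duplicates_py_alt (items : List String) : List String :=
  (items.foldl pyStepB ([], PySem.Dict.empty)).1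

-- ===== PRECONDITION & SPEC =====
def Spec_numbered_duplicates_py (items : List String) (out : List String) : Prop := out = numbered_duplicates_py_alt items
instance (items : List String) (out : List String) : Decidable (Spec_numbered_duplicates_py items out) := by unfold Spec_numbered_duplicates_py; infer_instance

-- ===== CLAIM (what is proved, stated in full; the proofs are below) =====
def Claim_equal_numbered_duplicates_py : Prop := ∀ (items : List String), Dom_numbered_duplicates_py items → Spec_numbered_duplicates_py items (numbered_duplicates_py items)

-- ===== LEMMAS AND PROOFS =====

-- A's second-pass transformation of one string
def stripZero (s : String) : String :=
  let split_number := rsplitUnd1 s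
  if split_number.getD 1 "" = "0" then split_number.getD 0 "" else s

theorem digitChar_big (m : Nat) (h : 16 ≤ m) : Nat.digitChar m = '*' := by
  unfold Nat.digitChar
  repeat rw [if_neg (by omega)]

theorem digitChar_small_ne : ∀ m, m < 16 → Nat.digitChar m ≠ '_' := by decide

theorem digitChar_ne_underscore (m : Nat) : Nat.digitChar m ≠ '_' := by
  by_cases h : m < 16
  · exact digitChar_small_ne m h
  · rw [digitChar_big m (by omega)]; decide

theorem toDigitsCore_no_underscore (f : Nat) : ∀ (n : Nat) (ds : List Char),
    (∀ c ∈ ds, c ≠ '_') → ∀ c ∈ Nat.toDigitsCore 10 f n ds, c ≠ '_' := by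
  induction f with
  | zero => intro n ds h; simpa [Nat.toDigitsCore] using h
  | succ f ih =>
    intro n ds h c hc
    simp only [Nat.toDigitsCore] at hc
    split at hc
    · rcases List.mem_cons.mp hc with h1 | h1
      · subst h1; exact digitChar_ne_underscore _
      · exact h c h1
    · refine ih (n / 10) (Nat.digitChar (n % 10) :: ds) ?_ c hc
      intro c' hc'
      rcases List.mem_cons.mp hc' with h1 | h1
      · subst h1; exact digitChar_ne_underscore _
      · exact h c' h1

theorem toChars_no_underscore (n : Int) : ∀ c ∈ PySem.Int.toChars n, c ≠ '_' := by
  unfold PySem.Int.toChars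
  split
  · intro c hc
    rcases List.mem_cons.mp hc with h1 | h1
    · subst h1; decide
    · exact toDigitsCore_no_underscore _ _ [] (by simp) c h1
  · exact toDigitsCore_no_underscore _ _ [] (by simp)

theorem toDigitsCore_suffix (f : Nat) : ∀ (n : Nat) (ds : List Char), 0 < f →
    ∃ pre, Nat.toDigitsCore 10 f n ds = pre ++ Nat.digitChar (n % 10) :: ds := by
  induction f with
  | zero => intro n ds h; omega
  | succ f ih =>
    intro n ds _
    simp only [Nat.toDigitsCore]
    split
    · exact ⟨[], rfl⟩
    · rcases Nat.eq_zero_or_pos f with hf | hf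
      · subst hf; exact ⟨[], rfl⟩
      · obtain ⟨pre, hpre⟩ := ih (n / 10) (Nat.digitChar (n % 10) :: ds) hf
        exact ⟨pre ++ [Nat.digitChar (n / 10 % 10)], by simp [hpre]⟩

theorem toDigits_pos_ne_zero (n : Nat) (hn : 0 < n) : Nat.toDigits 10 n ≠ ['0'] := by
  unfold Nat.toDigits
  simp only [Nat.toDigitsCore]
  split
  · rename_i h
    have h10 : n < 10 := by omega
    have : n % 10 = n := Nat.mod_eq_of_lt h10
    rw [this]
    interval_cases n <;> decide
  · rename_i h
    obtain ⟨pre, hpre⟩ := toDigitsCore_suffix n (n / 10) [Nat.digitChar (n % 10)] hn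
    rw [hpre]
    intro hcontra
    have := congrArg List.length hcontra
    simp at this

theorem toStr_eq_zero_iff (n : Int) : PySem.Int.toStr n = "0" ↔ n = 0 := by
  constructor
  · intro h
    have h' : PySem.Int.toChars n = ['0'] := by
      have := congrArg String.toList h
      rwa [PySem.Int.toList_toStr] at this
    unfold PySem.Int.toChars at h'
    split at h'
    · exact absurd h' (by simp)
    · rename_i hneg
      by_contra hne
      have hpos : 0 < n.toNat := by omega
      exact toDigits_pos_ne_zero n.toNat hpos h'
  · intro h; subst h; rfl

theorem rsplitUnd1Chars_no_underscore (ds : List Char) (h : ∀ c ∈ ds, c ≠ '_') :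
    rsplitUnd1Chars ds = [ds] := by
  induction ds with
  | nil => rfl
  | cons c rest ih =>
    have hc : c ≠ '_' := h c (List.mem_cons_self ..)
    rw [rsplitUnd1Chars, ih (fun c' hc' => h c' (List.mem_cons_of_mem _ hc'))]
    simp [hc]

theorem rsplitUnd1Chars_split (cs ds : List Char) (h : ∀ c ∈ ds, c ≠ '_') :
    rsplitUnd1Chars (cs ++ '_' :: ds) = [cs, ds] := by
  induction cs with
  | nil => rw [List.nil_append, rsplitUnd1Chars, rsplitUnd1Chars_no_underscore ds h]; rfl
  | cons c cs ih => rw [List.cons_append, rsplitUnd1Chars, ih]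

theorem stripZero_numbered (item : String) (n : Int) :
    stripZero (item ++ "_" ++ PySem.Int.toStr n) =
      if n = 0 then item else item ++ "_" ++ PySem.Int.toStr n := by
  have htl : (item ++ "_" ++ PySem.Int.toStr n).toList
      = item.toList ++ '_' :: (PySem.Int.toStr n).toList := by
    simp
  have hsplit : rsplitUnd1 (item ++ "_" ++ PySem.Int.toStr n)
      = [item, PySem.Int.toStr n] := by
    unfold rsplitUnd1
    rw [htl, PySem.Int.toList_toStr,
        rsplitUnd1Chars_split _ _ (toChars_no_underscore n)]
    simp [← PySem.Int.toList_toStr]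
  unfold stripZero
  rw [hsplit]
  simp only [List.getD, List.getElem?_cons_zero, List.getElem?_cons_succ,
    Option.getD_some, toStr_eq_zero_iff]

theorem loop_eq (items : List String) : ∀ (accA accB : List String)
    (dA dB : PySem.Dict String Int),
    (∀ k, dA.getD k 0 = dB.getD k 0) →
    accB = accA.map stripZero →
    (items.foldl pyStepB (accB, dB)).1 = ((items.foldl pyStepA (accA, dA)).1).map stripZero := by
  induction items with
  | nil => intro accA accB dA dB hd hacc; simpa using hacc
  | cons item rest ih =>
    intro accA accB dA dB hd hacc
    simp only [List.foldl_cons, pyStepA, pyStepB]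
    refine ih _ _ _ _ ?_ ?_
    · intro k
      rw [PySem.Dict.getD_insert, PySem.Dict.getD_insert, hd item]
      split <;> simp [hd k]
    · rw [hacc, List.map_append, List.map_cons, List.map_nil,
          stripZero_numbered, hd item]

theorem fromkeys_getD (items : List String) : ∀ (d : PySem.Dict String Int),
    (∀ k, d.getD k 0 = 0) →
    ∀ k, (items.foldl (fun d x => d.insert x 0) d).getD k 0 = 0 := by
  induction items with
  | nil => intro d hd k; exact hd k
  | cons x rest ih =>
    intro d hd k
    refine ih _ (fun k' => ?_) k
    rw [PySem.Dict.getD_insert]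
    split <;> simp [hd k']

-- ===== VERDICT (by name: the statement is the Claim_ definition above) =====
theorem numbered_duplicates_py_spec : Claim_equal_numbered_duplicates_py := by
  intro items _
  unfold Spec_numbered_duplicates_py numbered_duplicates_py numbered_duplicates_py_alt
  have hmap : ∀ (xs : List String),
      (PySem.List.enumerate xs 0).map (fun p =>
        let split_number := rsplitUnd1 p.2
        if split_number.getD 1 "" = "0" then split_number.getD 0 "" else p.2)
      = xs.map stripZero := by
    intro xs
    have : ((PySem.List.enumerate xs 0).map (·.2)).map stripZero = xs.map stripZero := by
      rw [PySem.List.map_snd_enumerate]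
    rw [← this, List.map_map]
    rfl
  rw [hmap]
  exact (loop_eq items [] [] _ PySem.Dict.empty
    (fun k => fromkeys_getD items PySem.Dict.empty (fun _ => rfl) k) rfl).symm
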